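-- pv_equiv track=rewrite | github.com/TheTeodora22/QRCode-Interpreter | reed_solomon.py | interleave_blocks
-- ===== SOURCE A (Python) =====
-- def interleave_blocks(blocks):
--     interleaved = []
--     max_len = max(len(block) for block in blocks)
--     for i in range(max_len):
--         for block in blocks:
--             if i < len(block):
--                 interleaved.append(block[i])
--     return interleaved
-- ===== SOURCE B (Python) =====
-- def interleave_blocks(blocks):
--     pairs = [(i, x) for block in blocks for i, x in enumerate(block)]
--     pairs.sort(key=lambda p: p[0])
--     return [x for _, x in pairs]
-- ===== Notes on version B (the rewrite author's own statement) =====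
-- stated objective: alternative
-- what changed: Replaces the range-over-max-length loop with indexed bounds checks by a decorate/stable-sort/strip pipeline: tag every element with its in-block index, stable-sort by index, strip the tags.
-- outside the precondition, e.g. on interleave_blocks([]): A raises ValueError, B returns []
import Mathlib
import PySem

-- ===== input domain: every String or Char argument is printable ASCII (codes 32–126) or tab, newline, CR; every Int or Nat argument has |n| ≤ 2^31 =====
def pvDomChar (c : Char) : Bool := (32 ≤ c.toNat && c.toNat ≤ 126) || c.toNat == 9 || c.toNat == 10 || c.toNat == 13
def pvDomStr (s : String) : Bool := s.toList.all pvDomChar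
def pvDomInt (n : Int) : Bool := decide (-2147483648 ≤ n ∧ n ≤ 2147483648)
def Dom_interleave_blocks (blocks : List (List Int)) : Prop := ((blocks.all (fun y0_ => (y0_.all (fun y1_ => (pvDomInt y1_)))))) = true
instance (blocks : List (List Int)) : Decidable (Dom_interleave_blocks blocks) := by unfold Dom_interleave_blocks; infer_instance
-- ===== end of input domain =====

-- B interleaves by decorating each element with its in-block index, stable-sorting by that
-- index and stripping the tags, instead of A's bounds-checked scan per column (objective: alternative).


-- ===== PORT A =====
def interleave_blocks (blocks : List (List Int)) : List Int :=
  match PySem.List.max? (blocks.map (fun block => PySem.List.len block)) (fun y => y) with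
  | none => []   -- max() over an empty generator: Python raises ValueError; excluded by Pre_
  | some max_len =>
    (PySem.List.pyRange 0 max_len).foldl (fun interleaved i =>
      blocks.foldl (fun interleaved block =>
        if i < PySem.List.len block then interleaved ++ [PySem.List.pyGetD block i 0]
        else interleaved) interleaved) []

-- ===== PORT B =====
def interleave_blocks_alt (blocks : List (List Int)) : List Int :=
  (PySem.List.sorted (blocks.flatMap (fun block => PySem.List.enumerate block 0))
    (fun p => p.1)).map (fun p => p.2)

-- ===== PRECONDITION & SPEC =====
-- Pre_ excludes only blocks = [], on which Python A raises ValueError (max() of an empty sequence).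
def Pre_interleave_blocks (blocks : List (List Int)) : Prop := blocks ≠ []
instance (blocks : List (List Int)) : Decidable (Pre_interleave_blocks blocks) := by unfold Pre_interleave_blocks; infer_instance
def pvWitness_interleave_blocks : List (List Int) := [[1], [2, 3]]

def Spec_interleave_blocks (blocks : List (List Int)) (out : List Int) : Prop := out = interleave_blocks_alt blocks
instance (blocks : List (List Int)) (out : List Int) : Decidable (Spec_interleave_blocks blocks out) := by unfold Spec_interleave_blocks; infer_instance

-- ===== CLAIM (what is proved, stated in full; the proofs are below) =====
def Claim_equal_interleave_blocks : Prop := ∀ (blocks : List (List Int)), Dom_interleave_blocks blocks → Pre_interleave_blocks blocks → Spec_interleave_blocks blocks (interleave_blocks blocks)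
-- ===== LEMMAS AND PROOFS =====

-- Inserting x into l ++ r lands exactly at the boundary when x goes after all of l and before all of r.
lemma insertBy_boundary {α : Type} (before : α → α → Bool) (x : α) (l r : List α)
    (hl : ∀ y ∈ l, before x y = false) (hr : ∀ y ∈ r, before x y = true) :
    PySem.List.insertBy before x (l ++ r) = l ++ x :: r := by
  induction l with
  | nil =>
    cases r with
    | nil => simp [PySem.List.insertBy]
    | cons y ys => simp [PySem.List.insertBy, hr y (by simp)]
  | cons a l ih =>
    have ha : before x a = false := hl a (by simp)
    simp only [List.cons_append, PySem.List.insertBy, ha, Bool.false_eq_true, if_false]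
    rw [ih (fun y hy => hl y (by simp [hy]))]

-- The column-grouped arrangement of a tagged list: all tag-0 pairs, then tag-1 pairs, …
def grouped (M : Int) (l : List (Int × Int)) : List (Int × Int) :=
  (PySem.List.pyRange 0 M).flatMap (fun i => l.filter (fun p => p.1 == i))

lemma flatMap_congr_mem {α β : Type} {l : List α} {f g : α → List β}
    (h : ∀ x ∈ l, f x = g x) : l.flatMap f = l.flatMap g := by
  induction l with
  | nil => rfl
  | cons a l ih =>
    simp only [List.flatMap_cons, h a (by simp), ih (fun x hx => h x (by simp [hx]))]

lemma insert_grouped (M : Int) (l : List (Int × Int)) (p : Int × Int)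
    (h0 : 0 ≤ p.1) (hM : p.1 < M) :
    PySem.List.insertBy (fun a b => decide (a.1 < b.1)) p (grouped M l) = grouped M (l ++ [p]) := by
  have hsplit : PySem.List.pyRange 0 M = PySem.List.pyRange 0 p.1 ++ p.1 :: PySem.List.pyRange (p.1 + 1) M := by
    rw [PySem.List.pyRange_one_append 0 p.1 M h0 (le_of_lt hM), PySem.List.pyRange_one_cons hM]
  have keylow : ∀ i ∈ PySem.List.pyRange 0 p.1, ∀ y ∈ l.filter (fun q => q.1 == i), y.1 < p.1 := by
    intro i hi y hy
    have := (List.mem_filter.mp hy).2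
    have : y.1 = i := by simpa using this
    have := PySem.List.mem_pyRange_one.mp hi
    omega
  have keyhigh : ∀ i ∈ PySem.List.pyRange (p.1 + 1) M, ∀ y ∈ l.filter (fun q => q.1 == i), p.1 < y.1 := by
    intro i hi y hy
    have := (List.mem_filter.mp hy).2
    have : y.1 = i := by simpa using this
    have := PySem.List.mem_pyRange_one.mp hi
    omega
  unfold grouped
  rw [hsplit]
  simp only [List.flatMap_append, List.flatMap_cons]
  have hb := insertBy_boundary (fun a b => decide (a.1 < b.1)) p
    ((PySem.List.pyRange 0 p.1).flatMap (fun i => l.filter (fun q => q.1 == i)) ++ l.filter (fun q => q.1 == p.1))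
    ((PySem.List.pyRange (p.1 + 1) M).flatMap (fun i => l.filter (fun q => q.1 == i)))
    (by
      intro y hy
      rcases List.mem_append.mp hy with h | h
      · rcases List.mem_flatMap.mp h with ⟨i, hi, hmem⟩
        have := keylow i hi y hmem
        simp; omega
      · have := (List.mem_filter.mp h).2
        have : y.1 = p.1 := by simpa using this
        simp; omega)
    (by
      intro y hy
      rcases List.mem_flatMap.mp hy with ⟨i, hi, hmem⟩
      have := keyhigh i hi y hmem
      simpa using this)
  have hb' := hb
  have elow : ∀ i ∈ PySem.List.pyRange 0 p.1,
      (l ++ [p]).filter (fun q => q.1 == i) = l.filter (fun q => q.1 == i) := by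
    intro i hi
    have := PySem.List.mem_pyRange_one.mp hi
    rw [List.filter_append]
    have : (([p]).filter (fun q => q.1 == i)) = [] := by
      simp only [List.filter]
      have : (p.1 == i) = false := by simp; omega
      simp [this]
    simp [this]
  have ehigh : ∀ i ∈ PySem.List.pyRange (p.1 + 1) M,
      (l ++ [p]).filter (fun q => q.1 == i) = l.filter (fun q => q.1 == i) := by
    intro i hi
    have := PySem.List.mem_pyRange_one.mp hi
    rw [List.filter_append]
    have : (([p]).filter (fun q => q.1 == i)) = [] := by
      simp only [List.filter]
      have : (p.1 == i) = false := by simp; omega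
      simp [this]
    simp [this]
  have emid : (l ++ [p]).filter (fun q => q.1 == p.1) = l.filter (fun q => q.1 == p.1) ++ [p] := by
    rw [List.filter_append]
    simp
  rw [flatMap_congr_mem elow, flatMap_congr_mem ehigh, emid]
  simpa [List.append_assoc] using hb'

-- A stable sort by tag of a list whose tags all lie in [0, M) is exactly the grouped arrangement.
lemma sorted_eq_grouped (M : Int) (l : List (Int × Int))
    (hk : ∀ p ∈ l, 0 ≤ p.1 ∧ p.1 < M) :
    PySem.List.sorted l (fun p => p.1) = grouped M l := by
  induction l using List.reverseRecOn with
  | nil => simp [grouped, PySem.List.sorted]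
  | append_singleton l p ih =>
    rw [PySem.List.sorted_eq_foldl_insertBy, List.foldl_append, ← PySem.List.sorted_eq_foldl_insertBy]
    simp only [List.foldl_cons, List.foldl_nil]
    rw [ih (fun q hq => hk q (by simp [hq]))]
    exact insert_grouped M l p (hk p (by simp)).1 (hk p (by simp)).2

-- Filtering enumerate by a fixed tag picks out (at most) the single element at that index.
lemma enumerate_filter (b : List Int) (i : Int) : ∀ s : Int,
    (PySem.List.enumerate b s).filter (fun p => p.1 == i) =
      if s ≤ i ∧ i < s + b.length then [(i, b.getD (i - s).toNat 0)] else [] := by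
  induction b with
  | nil =>
    intro s
    rw [if_neg (by simp)]
    rfl
  | cons x xs ih =>
    intro s
    rw [PySem.List.enumerate_cons]
    by_cases hsi : s = i
    · subst hsi
      have hc : s ≤ s ∧ s < s + ((x :: xs).length : Int) := by
        simp only [List.length_cons]
        push_cast
        omega
      rw [if_pos hc]
      simp only [List.filter_cons, beq_self_eq_true, if_true, ih (s + 1)]
      rw [if_neg (by omega)]
      simp
    · have hne : (((s, x) : Int × Int).1 == i) = false := by simp; omega
      simp only [List.filter_cons, hne, Bool.false_eq_true, if_false, ih (s + 1)]
      by_cases hlt : s + 1 ≤ i ∧ i < s + 1 + (xs.length : Int)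
      · rw [if_pos hlt, if_pos (by simp only [List.length_cons]; push_cast; omega)]
        have h1 : (i - s).toNat = (i - (s + 1)).toNat + 1 := by omega
        rw [h1]
        simp
      · rw [if_neg hlt, if_neg (by simp only [List.length_cons]; push_cast; omega)]

lemma flatMap_ite_singleton {α β : Type} (p : α → Prop) [DecidablePred p] (f : α → β) (l : List α) :
    l.flatMap (fun x => if p x then [f x] else []) = (l.filter (fun x => decide (p x))).map f := by
  induction l with
  | nil => rfl
  | cons a l ih =>
    by_cases hp : p a
    · simp [List.flatMap_cons, hp, ih]
    · simp [List.flatMap_cons, hp, ih]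

-- Column i of the grouped tagged list is exactly A's column i.
lemma col_eq (blocks : List (List Int)) (i : Int) (h0 : 0 ≤ i) :
    ((blocks.flatMap (fun b => PySem.List.enumerate b 0)).filter (fun p => p.1 == i)).map (fun p => p.2) =
      (blocks.filter (fun b => decide (i < PySem.List.len b))).map (fun b => PySem.List.pyGetD b i 0) := by
  rw [List.filter_flatMap, List.map_flatMap]
  have e1 : ∀ b ∈ blocks,
      ((PySem.List.enumerate b 0).filter (fun p => p.1 == i)).map (fun p => p.2) =
        if i < PySem.List.len b then [PySem.List.pyGetD b i 0] else [] := by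
    intro b _
    rw [enumerate_filter b i 0]
    by_cases hc : i < PySem.List.len b
    · have hlen : (0 : Int) ≤ i ∧ i < 0 + b.length := by
        simp only [PySem.List.len] at hc
        constructor <;> omega
      rw [if_pos hlen, if_pos hc]
      simp only [List.map_cons, List.map_nil]
      rw [PySem.List.pyGetD_of_nonneg b 0 h0]
      simp
    · have hlen : ¬ ((0 : Int) ≤ i ∧ i < 0 + b.length) := by
        simp only [PySem.List.len] at hc
        omega
      rw [if_neg hlen, if_neg hc]
      simp
  rw [flatMap_congr_mem e1, flatMap_ite_singleton (fun b => i < PySem.List.len b)]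

-- ===== VERDICT (by name: the statement is the Claim_ definition above) =====
theorem interleave_blocks_spec : Claim_equal_interleave_blocks := by
  intro blocks _ hpre
  unfold Spec_interleave_blocks
  obtain ⟨b0, bs, rfl⟩ : ∃ b0 bs, blocks = b0 :: bs := by
    cases blocks with
    | nil => exact absurd rfl hpre
    | cons b0 bs => exact ⟨b0, bs, rfl⟩
  set M : Int := List.foldl max (PySem.List.len b0) (bs.map (fun b => PySem.List.len b)) with hM
  have hmax : PySem.List.max? ((b0 :: bs).map (fun block => PySem.List.len block)) (fun y => y) = some M := by
    rw [List.map_cons, PySem.List.max?_id_cons]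
  have hle : ∀ b ∈ b0 :: bs, PySem.List.len b ≤ M := by
    intro b hb
    rcases List.mem_cons.mp hb with rfl | hb
    · exact (PySem.List.le_foldl_max _ _).1
    · exact (PySem.List.le_foldl_max _ _).2 _ (List.mem_map_of_mem hb)
  -- every tag of the decorated list lies in [0, M)
  have hkeys : ∀ p ∈ (b0 :: bs).flatMap (fun b => PySem.List.enumerate b 0), 0 ≤ p.1 ∧ p.1 < M := by
    intro p hp
    rcases List.mem_flatMap.mp hp with ⟨b, hb, hmem⟩
    rcases (PySem.List.mem_enumerate_iff _ _ _).mp hmem with ⟨k, hk, rfl⟩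
    have := hle b hb
    simp only [PySem.List.len] at this
    constructor <;> [omega; (simp; omega)]
  -- B = grouped arrangement, stripped
  have hB : interleave_blocks_alt (b0 :: bs) =
      ((PySem.List.pyRange 0 M).flatMap
        (fun i => ((b0 :: bs).flatMap (fun b => PySem.List.enumerate b 0)).filter (fun p => p.1 == i))).map
        (fun p => p.2) := by
    unfold interleave_blocks_alt
    rw [sorted_eq_grouped M _ hkeys]
    rfl
  -- A = column-by-column flatMap over the same range
  have hA : interleave_blocks (b0 :: bs) =
      (PySem.List.pyRange 0 M).flatMap
        (fun i => ((b0 :: bs).filter (fun b => decide (i < PySem.List.len b))).map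
          (fun b => PySem.List.pyGetD b i 0)) := by
    unfold interleave_blocks
    rw [hmax]
    dsimp only
    rw [PySem.List.foldl_congr_mem _ _
      (fun acc i => acc ++ ((b0 :: bs).filter (fun b => decide (i < PySem.List.len b))).map
        (fun b => PySem.List.pyGetD b i 0)) _
      (fun acc i _ => PySem.List.foldl_append_ite _ _ _ _)]
    rw [PySem.List.foldl_append_eq_flatMap]
    simp
  rw [hA, hB, List.map_flatMap]
  exact (flatMap_congr_mem (fun i hi =>
    (col_eq (b0 :: bs) i (PySem.List.mem_pyRange_one.mp hi).1).symm))
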